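-- pv_equiv track=rewrite | github.com/R0han3044/InnovateX-IBM | pages/wellness_dashboard.py | calculate_wellness_streak
-- ===== SOURCE A (Python) =====
-- def calculate_wellness_streak(scores):
--     """Calculate consecutive days with good wellness scores"""
--     if not scores:
--         return 0
--
--     streak = 0
--     for score in reversed(scores):
--         if score >= 70:  # Good wellness threshold
--             streak += 1
--         else:
--             break
--
--     return streak
-- ===== SOURCE B (Python) =====
-- def calculate_wellness_streak(scores):
--     """Calculate consecutive days with good wellness scores"""
--     streak = 0
--     for score in scores:
--         streak = streak + 1 if score >= 70 else 0
--     return streak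
-- ===== Notes on version B (the rewrite author's own statement) =====
-- stated objective: simpler
-- what changed: Replaces the reverse scan with break (plus empty-list guard) by a single forward pass that increments the counter on a good score and resets it to 0 on a bad one; the final counter is the trailing streak.
import Mathlib
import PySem

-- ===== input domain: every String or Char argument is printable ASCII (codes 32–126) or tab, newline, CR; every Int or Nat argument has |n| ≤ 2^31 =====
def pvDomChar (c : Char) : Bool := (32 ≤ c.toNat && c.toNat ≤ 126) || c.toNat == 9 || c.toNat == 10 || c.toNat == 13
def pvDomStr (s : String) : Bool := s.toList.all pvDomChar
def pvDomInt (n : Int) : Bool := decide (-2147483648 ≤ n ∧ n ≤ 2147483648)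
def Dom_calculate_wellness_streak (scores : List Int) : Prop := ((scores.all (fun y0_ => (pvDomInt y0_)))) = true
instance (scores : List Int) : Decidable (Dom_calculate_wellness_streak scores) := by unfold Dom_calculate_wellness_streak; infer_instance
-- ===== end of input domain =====

-- B replaces A's reverse scan with break (plus empty guard) by a single forward pass that resets the counter on a bad score: simpler, same cost.


-- ===== PORT A =====
-- loop 'for score in reversed(scores): if score >= 70: streak += 1 else: break'
def pvLoopA (streak : Int) : List Int → Int
  | [] => streak
  | x :: xs => if x ≥ 70 then pvLoopA (streak + 1) xs else streak

def calculate_wellness_streak (scores : List Int) : Int :=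
  if scores = [] then 0 else pvLoopA 0 scores.reverse

-- ===== PORT B =====
def calculate_wellness_streak_alt (scores : List Int) : Int :=
  scores.foldl (fun streak score => if score ≥ 70 then streak + 1 else 0) 0

-- ===== PRECONDITION & SPEC =====
def Spec_calculate_wellness_streak (scores : List Int) (out : Int) : Prop := out = calculate_wellness_streak_alt scores
instance (scores : List Int) (out : Int) : Decidable (Spec_calculate_wellness_streak scores out) := by unfold Spec_calculate_wellness_streak; infer_instance

-- ===== CLAIM (what is proved, stated in full; the proofs are below) =====
def Claim_equal_calculate_wellness_streak : Prop := ∀ (scores : List Int), Dom_calculate_wellness_streak scores → Spec_calculate_wellness_streak scores (calculate_wellness_streak scores)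

-- ===== LEMMAS AND PROOFS =====
lemma pvLoopA_shift (l : List Int) (s : Int) : pvLoopA s l = s + pvLoopA 0 l := by
  induction l generalizing s with
  | nil => simp [pvLoopA]
  | cons x xs ih =>
    simp only [pvLoopA]
    split_ifs with h
    · rw [ih (s + 1), ih (0 + 1)]; ring
    · simp

lemma pv_fold_eq_loop (l : List Int) :
    l.foldl (fun streak score => if score ≥ 70 then streak + 1 else 0) 0 = pvLoopA 0 l.reverse := by
  induction l using List.reverseRecOn with
  | nil => simp [pvLoopA]
  | append_singleton m x ih =>
    rw [List.foldl_append, List.reverse_append]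
    simp only [List.foldl, List.reverse_singleton, List.singleton_append, pvLoopA]
    split_ifs with h
    · rw [pvLoopA_shift, ih]; ring
    · rfl

-- ===== VERDICT (by name: the statement is the Claim_ definition above) =====
theorem calculate_wellness_streak_spec : Claim_equal_calculate_wellness_streak := by
  intro scores _
  unfold Spec_calculate_wellness_streak calculate_wellness_streak calculate_wellness_streak_alt
  rcases h : scores with _ | ⟨a, l⟩
  · simp
  · simp only [if_neg (List.cons_ne_nil a l), pv_fold_eq_loop]
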